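-- pv_equiv track=rewrite | github.com/Newsujin/Algorithm | 프로그래머스/1/42862. 체육복/체육복.py | solution
-- ===== SOURCE A (Python) =====
-- def solution(n, lost, reserve):
--     lost.sort()
--     reserve.sort()
--
--     tmp_lost = [i for i in lost if i not in reserve]
--     tmp_reserve = [i for i in reserve if i not in lost]
--
--     for i in tmp_reserve:
--         if i - 1 in tmp_lost:
--             tmp_lost.remove(i - 1)
--         elif i + 1 in tmp_lost:
--             tmp_lost.remove(i + 1)
--
--     return n - len(tmp_lost)
-- ===== SOURCE B (Python) =====
-- def solution(n, lost, reserve):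
--     lost.sort()
--     reserve.sort()
--
--     lost_set = set(lost)
--     reserve_set = set(reserve)
--     tmp_lost = [i for i in lost if i not in reserve_set]
--     tmp_reserve = [i for i in reserve if i not in lost_set]
--
--     i = j = matched = 0
--     while i < len(tmp_lost) and j < len(tmp_reserve):
--         if tmp_lost[i] < tmp_reserve[j] - 1:
--             i += 1
--         elif tmp_lost[i] > tmp_reserve[j] + 1:
--             j += 1
--         else:
--             matched += 1
--             i += 1
--             j += 1
--
--     return n - len(tmp_lost) + matched
-- ===== Notes on version B (the rewrite author's own statement) =====
-- stated objective: faster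
-- what changed: Replaces A's quadratic per-reserve search-and-remove over tmp_lost by set-based filtering plus a linear two-pointer merge scan over the two sorted filtered lists, counting matches instead of mutating a list.
import Mathlib
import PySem

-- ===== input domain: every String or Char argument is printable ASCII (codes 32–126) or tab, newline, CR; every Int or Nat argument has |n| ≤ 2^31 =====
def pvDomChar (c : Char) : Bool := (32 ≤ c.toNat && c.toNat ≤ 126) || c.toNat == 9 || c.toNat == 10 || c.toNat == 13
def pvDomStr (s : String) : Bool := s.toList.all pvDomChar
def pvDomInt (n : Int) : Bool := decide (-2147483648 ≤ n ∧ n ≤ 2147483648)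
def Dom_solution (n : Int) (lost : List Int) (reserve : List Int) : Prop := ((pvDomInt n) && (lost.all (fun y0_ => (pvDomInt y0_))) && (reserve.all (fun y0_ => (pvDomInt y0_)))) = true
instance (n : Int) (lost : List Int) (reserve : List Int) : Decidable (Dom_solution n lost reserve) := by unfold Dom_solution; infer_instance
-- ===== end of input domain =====

-- B replaces A's quadratic "for each reserve, search-and-remove in tmp_lost" loop by a linear
-- two-pointer merge scan over the two sorted filtered lists (and set-based filtering); both A and B
-- sort the argument lists in place, so the in-place mutation is identical.

-- ===== PORT A =====
-- one step of A's for-loop body: lend reserve i to i-1, else to i+1 (list.remove of a present element = List.erase)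
def pvStep (tl : List Int) (i : Int) : List Int :=
  if tl.contains (i - 1) then tl.erase (i - 1)
  else if tl.contains (i + 1) then tl.erase (i + 1)
  else tl

def solution (n : Int) (lost : List Int) (reserve : List Int) : Int :=
  let lostS := PySem.List.sorted lost (fun x => x) false
  let reserveS := PySem.List.sorted reserve (fun x => x) false
  let tmpLost := lostS.filter (fun i => !(reserveS.contains i))
  let tmpReserve := reserveS.filter (fun i => !(lostS.contains i))
  let final := tmpReserve.foldl pvStep tmpLost
  n - (final.length : Int)

-- ===== PORT B =====
-- the while-loop of Source B: two pointers i over L, j over R, counting matches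
-- (structural recursion on a fuel bound; each iteration advances i or j, so
-- fuel = L.length + R.length always suffices)
def pvTpLoop (L R : List Int) : Nat → Nat → Nat → Nat → Nat
  | 0, _, _, matched => matched
  | fuel + 1, i, j, matched =>
    if h : i < L.length ∧ j < R.length then
      if L[i] < R[j] - 1 then pvTpLoop L R fuel (i + 1) j matched
      else if L[i] > R[j] + 1 then pvTpLoop L R fuel i (j + 1) matched
      else pvTpLoop L R fuel (i + 1) (j + 1) (matched + 1)
    else matched

def solution_alt (n : Int) (lost : List Int) (reserve : List Int) : Int :=
  let lostS := PySem.List.sorted lost (fun x => x) false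
  let reserveS := PySem.List.sorted reserve (fun x => x) false
  let lostSet := PySem.Set.ofList lostS
  let reserveSet := PySem.Set.ofList reserveS
  let tmpLost := lostS.filter (fun i => !(PySem.Set.contains reserveSet i))
  let tmpReserve := reserveS.filter (fun i => !(PySem.Set.contains lostSet i))
  n - (tmpLost.length : Int) + (pvTpLoop tmpLost tmpReserve (tmpLost.length + tmpReserve.length) 0 0 0 : Int)

-- ===== PRECONDITION & SPEC =====
def Spec_solution (n : Int) (lost : List Int) (reserve : List Int) (out : Int) : Prop := out = solution_alt n lost reserve
instance (n : Int) (lost : List Int) (reserve : List Int) (out : Int) : Decidable (Spec_solution n lost reserve out) := by unfold Spec_solution; infer_instance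

-- ===== CLAIM (what is proved, stated in full; the proofs are below) =====
def Claim_equal_solution : Prop := ∀ (n : Int) (lost : List Int) (reserve : List Int), Dom_solution n lost reserve → Spec_solution n lost reserve (solution n lost reserve)

-- ===== LEMMAS AND PROOFS =====

-- number of matches of the two-pointer scan, as structural recursion on list suffixes
def pvCnt : List Int → List Int → Nat
  | [], _ => 0
  | _ :: _, [] => 0
  | l :: L, r :: R =>
    if l < r - 1 then pvCnt L (r :: R)
    else if l > r + 1 then pvCnt (l :: L) R
    else pvCnt L R + 1
termination_by L R => L.length + R.length

lemma set_contains_ofList (xs : List Int) (i : Int) :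
    PySem.Set.contains (PySem.Set.ofList xs) i = xs.contains i := by
  have h := PySem.Set.mem_ofList (xs := xs) (y := i)
  by_cases hi : i ∈ xs
  · simp [PySem.Set.contains, h.mpr hi, hi]
  · simp [PySem.Set.contains, hi]

lemma cnt_nil_right : ∀ (L : List Int), pvCnt L [] = 0 := by
  intro L; cases L <;> rw [pvCnt]

lemma tpLoop_eq_cnt : ∀ (fuel : Nat) (L R : List Int) (i j m : Nat),
    (L.length - i) + (R.length - j) ≤ fuel →
    pvTpLoop L R fuel i j m = m + pvCnt (L.drop i) (R.drop j) := by
  intro fuel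
  induction fuel with
  | zero =>
    intro L R i j m hf
    have hi : L.length ≤ i := by omega
    rw [pvTpLoop, List.drop_eq_nil_of_le hi, pvCnt]; omega
  | succ fuel ih =>
    intro L R i j m hf
    rw [pvTpLoop]
    by_cases h : i < L.length ∧ j < R.length
    · rw [dif_pos h]
      by_cases h1 : L[i] < R[j] - 1
      · rw [if_pos h1, ih L R (i + 1) j m (by omega),
            List.drop_eq_getElem_cons h.1, List.drop_eq_getElem_cons h.2, pvCnt, if_pos h1]
      · by_cases h2 : L[i] > R[j] + 1
        · rw [if_neg h1, if_pos h2, ih L R i (j + 1) m (by omega),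
              List.drop_eq_getElem_cons h.1, List.drop_eq_getElem_cons h.2, pvCnt]
          rw [← List.drop_eq_getElem_cons h.1]
          simp [h1, h2]
        · rw [if_neg h1, if_neg h2, ih L R (i + 1) (j + 1) (m + 1) (by omega),
              List.drop_eq_getElem_cons h.1, List.drop_eq_getElem_cons h.2, pvCnt]
          simp [h1, h2]
          omega
    · rw [dif_neg h]
      rcases Nat.lt_or_ge i L.length with hi | hi
      · have hj : R.length ≤ j := by omega
        rw [List.drop_eq_nil_of_le hj, cnt_nil_right]; omega
      · rw [List.drop_eq_nil_of_le hi, pvCnt]; omega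

lemma pv_foldl_nil : ∀ (R : List Int), R.foldl pvStep [] = [] := by
  intro R
  induction R with
  | nil => rfl
  | cons r R ihr => simpa [pvStep] using ihr

-- a head strictly below every r-1 in R passes through A's whole fold untouched
lemma fold_cons_low : ∀ (R : List Int) (l : Int) (L : List Int),
    (∀ r ∈ R, l < r - 1) →
    R.foldl pvStep (l :: L) = l :: R.foldl pvStep L := by
  intro R
  induction R with
  | nil => intro l L _; rfl
  | cons r R ih =>
    intro l L hlow
    have hr : l < r - 1 := hlow r (by simp)
    have h1 : l ≠ r - 1 := by omega
    have h2 : l ≠ r + 1 := by omega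
    have hstep : pvStep (l :: L) r = l :: pvStep L r := by
      unfold pvStep
      simp [
        (show ¬ (r - 1 = l) by omega), (show ¬ (r + 1 = l) by omega),
        (show ¬ (l = r - 1) by omega), (show ¬ (l = r + 1) by omega)]
      split_ifs <;> rfl
    simp only [List.foldl_cons, hstep]
    exact ih l (pvStep L r) (fun r' hr' => hlow r' (by simp [hr']))

-- main invariant: on sorted, value-disjoint lists, A's fold loses exactly pvCnt elements
lemma fold_length_cnt : ∀ (m : Nat) (L R : List Int), L.length + R.length ≤ m →
    L.Pairwise (· ≤ ·) → R.Pairwise (· ≤ ·) → (∀ l ∈ L, l ∉ R) →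
    (R.foldl pvStep L).length + pvCnt L R = L.length := by
  intro m
  induction m with
  | zero =>
    intro L R hm _ _ _
    have : L = [] ∧ R = [] := by
      constructor <;> (apply List.eq_nil_of_length_eq_zero; omega)
    simp [this.1, this.2, pvCnt]
  | succ m ih =>
    intro L R hm hL hR hdisj
    cases L with
    | nil =>
      simp [pv_foldl_nil, pvCnt]
    | cons l L' =>
      cases R with
      | nil => simp [pvCnt]
      | cons r R' =>
        have hLtail := hL.tail
        have hRtail := hR.tail
        have hlL : ∀ x ∈ L', l ≤ x := fun x hx => (List.pairwise_cons.mp hL).1 x hx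
        have hrR : ∀ x ∈ R', r ≤ x := fun x hx => (List.pairwise_cons.mp hR).1 x hx
        have hlr : l ≠ r := fun he => (hdisj l (by simp)) (by simp [he])
        by_cases h1 : l < r - 1
        · -- l is dead: passes through the whole fold
          have hlow : ∀ r' ∈ r :: R', l < r' - 1 := by
            intro r' hr'
            rcases List.mem_cons.mp hr' with he | hm'
            · omega
            · have := hrR r' hm'; omega
          rw [fold_cons_low (r :: R') l L' hlow]
          rw [pvCnt, if_pos h1]
          have := ih L' (r :: R') (by simp at hm ⊢; omega) hLtail hR
            (fun x hx => hdisj x (by simp [hx]))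
          simp only [List.length_cons]
          omega
        · by_cases h2 : l > r + 1
          · -- r matches nothing: step is the identity here
            have hnm1 : ¬ (l :: L').contains (r - 1) = true := by
              simp only [List.contains_iff_mem, List.mem_cons]
              rintro (he | hmem)
              · omega
              · have := hlL _ hmem; omega
            have hnm2 : ¬ (l :: L').contains (r + 1) = true := by
              simp only [List.contains_iff_mem, List.mem_cons]
              rintro (he | hmem)
              · omega
              · have := hlL _ hmem; omega
            have hstep : pvStep (l :: L') r = l :: L' := by
              unfold pvStep; rw [if_neg hnm1, if_neg hnm2]
            rw [List.foldl_cons, hstep, pvCnt, if_neg h1, if_pos h2]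
            exact ih (l :: L') R' (by simp at hm ⊢; omega) hL hRtail
              (fun x hx => fun hmem => hdisj x hx (by simp [hmem]))
          · -- match: l = r - 1 or l = r + 1; either way the head is erased
            have hcase : l = r - 1 ∨ l = r + 1 := by omega
            have hstep : pvStep (l :: L') r = L' := by
              rcases hcase with he | he
              · unfold pvStep
                rw [if_pos (by simp [← he])]
                simp [← he, List.erase_cons_head]
              · have hnm1 : ¬ (l :: L').contains (r - 1) = true := by
                  simp only [List.contains_iff_mem, List.mem_cons]
                  rintro (h' | hmem)
                  · omega
                  · have := hlL _ hmem; omega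
                unfold pvStep
                rw [if_neg hnm1, if_pos (by simp [← he])]
                simp [← he, List.erase_cons_head]
            rw [List.foldl_cons, hstep, pvCnt, if_neg h1, if_neg h2]
            have := ih L' R' (by simp at hm ⊢; omega) hLtail hRtail
              (fun x hx => fun hmem => hdisj x (by simp [hx]) (by simp [hmem]))
            simp only [List.length_cons]
            omega

-- ===== VERDICT (by name: the statement is the Claim_ definition above) =====
theorem solution_spec : Claim_equal_solution := by
  intro n lost reserve _
  unfold Spec_solution solution solution_alt
  simp only [set_contains_ofList]
  set lostS := PySem.List.sorted lost (fun x => x) false with hls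
  set reserveS := PySem.List.sorted reserve (fun x => x) false with hrs
  set tmpLost := lostS.filter (fun i => !(reserveS.contains i)) with htl
  set tmpReserve := reserveS.filter (fun i => !(lostS.contains i)) with htr
  have hLsorted : tmpLost.Pairwise (· ≤ ·) :=
    List.Pairwise.sublist List.filter_sublist
      (PySem.List.sorted_pairwise (xs := lost) (key := fun x => x))
  have hRsorted : tmpReserve.Pairwise (· ≤ ·) :=
    List.Pairwise.sublist List.filter_sublist
      (PySem.List.sorted_pairwise (xs := reserve) (key := fun x => x))
  have hdisj : ∀ l ∈ tmpLost, l ∉ tmpReserve := by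
    intro l hl hr
    have hl2 := List.of_mem_filter hl
    have hr2 := List.mem_of_mem_filter hr
    simp at hl2
    exact hl2 hr2
  have hkey := fold_length_cnt (tmpLost.length + tmpReserve.length) tmpLost tmpReserve
    (le_refl _) hLsorted hRsorted hdisj
  have htp := tpLoop_eq_cnt (tmpLost.length + tmpReserve.length) tmpLost tmpReserve 0 0 0 (by omega)
  simp only [List.drop_zero, Nat.zero_add] at htp
  rw [htp]
  omega
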